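-- pv_equiv track=rewrite | github.com/somya-anchalia/dsa-problems | Assessment practise/5_assessment_HR(Amz).py | makePowerNonDecreasing
-- ===== SOURCE A (Python) =====
-- def makePowerNonDecreasing(power):
--     n = len(power)
--     total_increase = 0
--
--     for i in range(1, n):
--         if power[i] < power[i - 1]:
--             increment = power[i - 1] - power[i]
--             total_increase += increment
--             for j in range(i,n):
--                 power[j] += increment
--
--     return total_increase
-- ===== SOURCE B (Python) =====
-- def makePowerNonDecreasing(power):
--     # One pass: track the cumulative suffix offset instead of rewriting the
--     # suffix each time. Does not mutate the input (A does; return value equal).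
--     if not power:
--         return 0
--     off = 0
--     total = 0
--     cur = power[0]
--     for x in power[1:]:
--         e = x + off
--         if e < cur:
--             d = cur - e
--             total += d
--             off += d
--         else:
--             cur = e
--     return total
-- ===== Notes on version B (the rewrite author's own statement) =====
-- stated objective: faster
-- what changed: B replaces A's quadratic loop that adds the deficit to every element of the suffix with a single pass carrying a cumulative offset (and B does not mutate the input list).
import Mathlib
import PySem

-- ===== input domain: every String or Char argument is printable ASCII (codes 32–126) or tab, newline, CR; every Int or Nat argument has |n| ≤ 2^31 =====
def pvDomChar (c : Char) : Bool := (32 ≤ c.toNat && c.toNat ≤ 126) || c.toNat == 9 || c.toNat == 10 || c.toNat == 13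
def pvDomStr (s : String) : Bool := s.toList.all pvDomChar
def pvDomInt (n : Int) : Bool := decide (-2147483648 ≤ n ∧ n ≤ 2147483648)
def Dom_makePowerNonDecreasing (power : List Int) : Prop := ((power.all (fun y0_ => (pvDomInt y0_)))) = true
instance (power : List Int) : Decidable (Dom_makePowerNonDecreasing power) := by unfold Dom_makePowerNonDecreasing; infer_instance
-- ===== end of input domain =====

-- B replaces A's quadratic suffix-rewriting loop with a single pass carrying a
-- cumulative offset (asymptotically faster). A mutates its argument in place;
-- B does not: the equivalence proved here is about the RETURN value only.


-- ===== PORT A =====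
-- inner loop 'for j in range(i, n): power[j] += increment'
def pvInnerA (n inc : Int) (p : List Int) (i : Int) : List Int :=
  (PySem.List.pyRange i n 1).foldl
    (fun q j => q.set j.toNat (PySem.List.pyGetD q j 0 + inc)) p

-- one iteration of the outer 'for i in range(1, n)' loop; state = (power, total_increase)
def pvStepA (n : Int) (s : List Int × Int) (i : Int) : List Int × Int :=
  if PySem.List.pyGetD s.1 i 0 < PySem.List.pyGetD s.1 (i - 1) 0 then
    let inc := PySem.List.pyGetD s.1 (i - 1) 0 - PySem.List.pyGetD s.1 i 0
    (pvInnerA n inc s.1 i, s.2 + inc)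
  else s

def makePowerNonDecreasing (power : List Int) : Int :=
  ((PySem.List.pyRange 1 (power.length : Int) 1).foldl
    (pvStepA (power.length : Int)) (power, 0)).2

-- ===== PORT B =====
-- state = (off, total, cur)
def pvStepB (s : Int × Int × Int) (x : Int) : Int × Int × Int :=
  let e := x + s.1
  if e < s.2.2 then (s.1 + (s.2.2 - e), s.2.1 + (s.2.2 - e), s.2.2)
  else (s.1, s.2.1, e)

def makePowerNonDecreasing_alt (power : List Int) : Int :=
  match power with
  | [] => 0
  | h :: t => (t.foldl pvStepB (0, 0, h)).2.1

-- ===== PRECONDITION & SPEC =====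
def Spec_makePowerNonDecreasing (power : List Int) (out : Int) : Prop := out = makePowerNonDecreasing_alt power
instance (power : List Int) (out : Int) : Decidable (Spec_makePowerNonDecreasing power out) := by unfold Spec_makePowerNonDecreasing; infer_instance

-- ===== CLAIM (what is proved, stated in full; the proofs are below) =====
def Claim_equal_makePowerNonDecreasing : Prop := ∀ (power : List Int), Dom_makePowerNonDecreasing power → Spec_makePowerNonDecreasing power (makePowerNonDecreasing power)

-- ===== LEMMAS AND PROOFS =====

-- A's inner loop adds inc to every element of the suffix starting at index pre.length.
lemma pvInnerA_eq (suf : List Int) : ∀ (pre : List Int) (inc n : Int),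
    n = (pre.length : Int) + suf.length →
    pvInnerA n inc (pre ++ suf) (pre.length : Int) = pre ++ suf.map (· + inc) := by
  induction suf with
  | nil =>
    intro pre inc n hn
    unfold pvInnerA
    simp only [List.length_nil, Nat.cast_zero, add_zero] at hn
    rw [PySem.List.pyRange_one_eq_nil (by omega)]
    simp
  | cons x rest ih =>
    intro pre inc n hn
    simp only [List.length_cons] at hn
    unfold pvInnerA
    rw [PySem.List.pyRange_one_cons (by push_cast at hn; omega)]
    simp only [List.foldl_cons]
    have hget : PySem.List.pyGetD (pre ++ x :: rest) (pre.length : Int) 0 = x := by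
      rw [PySem.List.pyGetD_eq_getElem _ _ (by omega)
        (by simp only [List.length_append, List.length_cons]; push_cast; omega)]
      simp
    have hset : (pre ++ x :: rest).set ((pre.length : Int)).toNat (x + inc)
        = (pre ++ [x + inc]) ++ rest := by simp
    rw [hget, hset]
    have ih' := ih (pre ++ [x + inc]) inc n (by simp only [List.length_append, List.length_cons, List.length_nil]; push_cast at hn ⊢; omega)
    unfold pvInnerA at ih'
    have hpl : ((pre.length : Int)) + 1 = ((pre ++ [x + inc]).length : Int) := by simp
    rw [hpl, ih']
    simp

-- Main loop invariant: A's list is pre ++ cur :: suf.map (·+off); A's remaining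
-- outer loop adds to the total exactly what B's fold over suf adds from (off, tot, cur).
lemma pvLoop_eq (suf : List Int) : ∀ (pre : List Int) (cur off tot n : Int),
    n = (pre.length : Int) + 1 + suf.length →
    ((PySem.List.pyRange ((pre.length : Int) + 1) n 1).foldl (pvStepA n)
        (pre ++ cur :: suf.map (· + off), tot)).2
      = (suf.foldl pvStepB (off, tot, cur)).2.1 := by
  induction suf with
  | nil =>
    intro pre cur off tot n hn
    simp only [List.length_nil, Nat.cast_zero, add_zero] at hn
    rw [PySem.List.pyRange_one_eq_nil (by omega)]
    simp
  | cons x rest ih =>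
    intro pre cur off tot n hn
    simp only [List.length_cons] at hn
    rw [PySem.List.pyRange_one_cons (by push_cast at hn; omega)]
    simp only [List.foldl_cons]
    have hq : pre ++ cur :: (x :: rest).map (· + off)
        = (pre ++ [cur]) ++ (x + off) :: rest.map (· + off) := by simp
    have hplen : ((pre.length : Int)) + 1 = (((pre ++ [cur]).length : Int)) := by simp
    have hi : PySem.List.pyGetD (pre ++ cur :: (x :: rest).map (· + off)) ((pre.length : Int) + 1) 0 = x + off := by
      rw [hq, hplen, PySem.List.pyGetD_eq_getElem _ _ (by omega)
        (by simp only [List.length_append, List.length_cons, List.length_map]; push_cast; omega)]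
      simp
    have hi1 : PySem.List.pyGetD (pre ++ cur :: (x :: rest).map (· + off)) ((pre.length : Int) + 1 - 1) 0 = cur := by
      have he : ((pre.length : Int)) + 1 - 1 = ((pre.length : Int)) := by ring
      rw [he, PySem.List.pyGetD_eq_getElem _ _ (by omega)
        (by simp only [List.length_append, List.length_cons, List.length_map]; push_cast; omega)]
      simp
    by_cases hlt : x + off < cur
    · have hstep : pvStepA n (pre ++ cur :: (x :: rest).map (· + off), tot) ((pre.length : Int) + 1)
          = ((pre ++ [cur]) ++ cur :: rest.map (· + (off + (cur - (x + off)))), tot + (cur - (x + off))) := by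
        unfold pvStepA
        simp only [hi, hi1, if_pos hlt]
        refine Prod.ext ?_ rfl
        show pvInnerA n (cur - (x + off)) (pre ++ cur :: (x :: rest).map (· + off)) ((pre.length : Int) + 1) = _
        rw [hq]
        have hpl : ((pre.length : Int)) + 1 = (((pre ++ [cur]).length : Int)) := by simp
        rw [hpl, pvInnerA_eq ((x + off) :: rest.map (· + off)) (pre ++ [cur]) (cur - (x + off)) n
          (by simp only [List.length_append, List.length_cons, List.length_map, List.length_nil]; push_cast at hn ⊢; omega)]
        simp only [List.map_cons, List.map_map]
        congr 2
        · ring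
        · apply List.map_congr_left; intro a _; simp [Function.comp]; ring
      rw [hstep]
      have ih' := ih (pre ++ [cur]) cur (off + (cur - (x + off))) (tot + (cur - (x + off))) n
        (by simp only [List.length_append, List.length_cons, List.length_nil]; push_cast at hn ⊢; omega)
      have hL : (((pre ++ [cur]).length : Int)) + 1 = ((pre.length : Int)) + 1 + 1 := by simp only [List.length_append, List.length_cons, List.length_nil]; push_cast; ring
      rw [hL] at ih'
      rw [ih']
      have hB : pvStepB (off, tot, cur) x = (off + (cur - (x + off)), tot + (cur - (x + off)), cur) := by
        simp [pvStepB, hlt]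
      rw [hB]
    · have hstep : pvStepA n (pre ++ cur :: (x :: rest).map (· + off), tot) ((pre.length : Int) + 1)
          = ((pre ++ [cur]) ++ (x + off) :: rest.map (· + off), tot) := by
        unfold pvStepA
        simp only [hi, hi1, if_neg hlt]
        rw [hq]
      rw [hstep]
      have ih' := ih (pre ++ [cur]) (x + off) off tot n (by simp only [List.length_append, List.length_cons, List.length_nil]; push_cast at hn ⊢; omega)
      have hL : (((pre ++ [cur]).length : Int)) + 1 = ((pre.length : Int)) + 1 + 1 := by simp only [List.length_append, List.length_cons, List.length_nil]; push_cast; ring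
      rw [hL] at ih'
      rw [ih']
      have hB : pvStepB (off, tot, cur) x = (off, tot, x + off) := by
        simp [pvStepB, hlt]
      rw [hB]

-- ===== VERDICT (by name: the statement is the Claim_ definition above) =====
theorem makePowerNonDecreasing_spec : Claim_equal_makePowerNonDecreasing := by
  intro power _
  unfold Spec_makePowerNonDecreasing makePowerNonDecreasing makePowerNonDecreasing_alt
  cases power with
  | nil => simp [PySem.List.pyRange]
  | cons h t =>
    have := pvLoop_eq t [] h 0 0 ((h :: t).length : Int) (by simp; ring)
    simp only [List.length_nil, Nat.cast_zero, zero_add] at this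
    have hmap : t.map (· + 0) = t := by simp
    rw [hmap] at this
    exact this
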